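-- pv_equiv track=rewrite | github.com/haileadugna/competitive-programming | 899. Orderly Queue.py | orderlyQueue
-- ===== SOURCE A (Python) =====
-- def orderlyQueue(s: str, k: int) -> str:
--     if k == 1:
--         ans = s
--         for i in range(len(s)):
--             s = s[1:] + s[0]
--             ans = min(ans, s)
--         return ans
--     else:
--         ans = "".join(sorted(list(s)))
--         return ans
-- ===== SOURCE B (Python) =====
-- def orderlyQueue(s: str, k: int) -> str:
--     if k == 1:
--         n = len(s)
--         t = s + s
--         return min((t[i:i + n] for i in range(n)), default=s)
--     return "".join(sorted(s))
-- ===== Notes on version B (the rewrite author's own statement) =====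
-- stated objective: alternative
-- what changed: For k == 1, instead of A's loop that repeatedly rotates the string in place and keeps a running min, B slices all n rotations directly out of the doubled string s+s and takes their minimum in one min() call; the k != 1 branch is the same sort.
import Mathlib
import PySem

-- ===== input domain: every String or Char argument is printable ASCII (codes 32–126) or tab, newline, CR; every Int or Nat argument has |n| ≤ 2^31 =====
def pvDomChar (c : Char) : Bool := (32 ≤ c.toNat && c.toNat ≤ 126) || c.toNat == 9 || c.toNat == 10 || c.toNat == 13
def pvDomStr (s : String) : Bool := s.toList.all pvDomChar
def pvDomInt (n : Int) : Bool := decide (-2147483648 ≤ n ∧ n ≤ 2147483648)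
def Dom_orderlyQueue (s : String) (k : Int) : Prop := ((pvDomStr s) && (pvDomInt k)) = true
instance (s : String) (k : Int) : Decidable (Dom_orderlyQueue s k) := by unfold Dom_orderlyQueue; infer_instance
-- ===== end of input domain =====

-- B replaces A's n successive rotate-and-compare passes by slicing all n rotations out of the
-- doubled string s+s and taking their minimum once (objective: alternative decomposition).

-- ===== PORT A =====
-- A, k == 1: ans = s; for i in range(len(s)): s = s[1:] + s[0]; ans = min(ans, s); return ans.
-- Loop state is the pair (ans, s).  min(ans, s) on str = if s < ans then s else ans.
def orderlyQueue (s : String) (k : Int) : String :=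
  if k = 1 then
    ((PySem.List.pyRange 0 (PySem.Str.len s) 1).foldl
      (fun (p : String × String) _ =>
        let s' : String :=
          match PySem.Str.pyGet? p.2 0 with
          | some c => String.ofList ((PySem.Str.slice p.2 (some 1) none).toList ++ [c])
          | none => p.2   -- unreachable: the loop body only runs when len(s) ≥ 1, and rotations keep the length
        (if s' < p.1 then s' else p.1, s'))
      (s, s)).1
  else
    -- "".join(sorted(list(s)))
    String.ofList (PySem.List.sorted s.toList (fun c => c) false)

-- ===== PORT B =====
def orderlyQueue_alt (s : String) (k : Int) : String :=
  if k = 1 then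
    let n := PySem.Str.len s
    let t := String.ofList (s.toList ++ s.toList)    -- t = s + s
    PySem.List.minD
      ((PySem.List.pyRange 0 n 1).map (fun i => PySem.Str.slice t (some i) (some (i + n))))
      (fun x => x) s
  else
    -- "".join(sorted(s))
    String.ofList (PySem.List.sorted s.toList (fun c => c) false)

-- ===== PRECONDITION & SPEC =====
def Spec_orderlyQueue (s : String) (k : Int) (out : String) : Prop := out = orderlyQueue_alt s k
instance (s : String) (k : Int) (out : String) : Decidable (Spec_orderlyQueue s k out) := by unfold Spec_orderlyQueue; infer_instance

-- ===== CLAIM (what is proved, stated in full; the proofs are below) =====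
def Claim_equal_orderlyQueue : Prop := ∀ (s : String) (k : Int), Dom_orderlyQueue s k → Spec_orderlyQueue s k (orderlyQueue s k)

-- ===== LEMMAS AND PROOFS =====

-- the binary min A's loop and Python's min() both use: keep the accumulator on ties
def pvMin2 (m b : String) : String := if b < m then b else m

-- candidates accumulated by A's loop after m iterations starting from x: rotations 1 .. m
def pvCands (m : Nat) (x : List Char) : List String :=
  (List.range m).map (fun j => String.ofList (x.rotate (j + 1)))

lemma pvMin2_le (m b : String) : pvMin2 m b ≤ m := by
  unfold pvMin2; split_ifs with h
  · exact le_of_lt h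
  · exact le_refl m

lemma foldl_pvMin2_le (M : List String) : ∀ a : String, M.foldl pvMin2 a ≤ a := by
  induction M with
  | nil => intro a; exact le_refl a
  | cons h t ih => intro a; exact le_trans (ih (pvMin2 a h)) (pvMin2_le a h)

-- one iteration of A's loop body computes the left rotation
lemma pvRotStep (x : List Char) (hx : x ≠ []) :
    (match PySem.Str.pyGet? (String.ofList x) 0 with
      | some c => String.ofList ((PySem.Str.slice (String.ofList x) (some 1) none).toList ++ [c])
      | none => String.ofList x) = String.ofList (x.rotate 1) := by
  cases x with
  | nil => exact absurd rfl hx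
  | cons c cs =>
    simp [PySem.Str.toList_slice, PySem.Chars.slice, PySem.List.slice_from,
      List.rotate_cons_succ]

-- splitting off the first of m+1 candidate rotations
lemma pvCands_succ (m : Nat) (x : List Char) :
    pvCands (m + 1) x = String.ofList (x.rotate 1) :: pvCands m (x.rotate 1) := by
  unfold pvCands
  rw [List.range_succ_eq_map, List.map_cons, List.map_map]
  congr 1
  apply List.map_congr_left
  intro j hj
  simp only [Function.comp_apply, List.rotate_rotate]
  congr 2
  omega

-- A's loop invariant: the accumulator is the running min over pvCands and the string rotates once per step
lemma pvALoop (idx : List Int) : ∀ (a : String) (x : List Char), x ≠ [] →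
    (idx.foldl
      (fun (p : String × String) _ =>
        let s' : String :=
          match PySem.Str.pyGet? p.2 0 with
          | some c => String.ofList ((PySem.Str.slice p.2 (some 1) none).toList ++ [c])
          | none => p.2
        (if s' < p.1 then s' else p.1, s'))
      (a, String.ofList x)) =
    ((pvCands idx.length x).foldl pvMin2 a, String.ofList (x.rotate idx.length)) := by
  induction idx with
  | nil => intro a x hx; simp [pvCands]
  | cons i rest ih =>
    intro a x hx
    have hrot : (x.rotate 1) ≠ [] := by
      intro h; exact hx (by simpa using congrArg List.length h)
    simp only [List.foldl_cons]
    rw [pvRotStep x hx]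
    rw [ih (if String.ofList (x.rotate 1) < a then String.ofList (x.rotate 1) else a) (x.rotate 1) hrot]
    rw [List.length_cons, pvCands_succ, List.foldl_cons, List.rotate_rotate]
    rw [Nat.add_comm 1 rest.length]
    rfl

-- B's slice of the doubled list is the rotation
lemma pvSliceRot (l : List Char) (j : Nat) (hj : j < l.length) :
    PySem.Str.slice (String.ofList (l ++ l)) (some (j : Int)) (some ((j : Int) + (l.length : Int)))
      = String.ofList (l.rotate j) := by
  apply String.toList_inj.mp
  rw [PySem.Str.toList_slice]
  show PySem.List.slice (String.ofList (l ++ l)).toList _ _ = _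
  have hcast : ((j : Int) + (l.length : Int)) = ((j + l.length : Nat) : Int) := by push_cast; ring
  rw [hcast, PySem.List.slice_toNat _ (by positivity) (by positivity)]
  simp only [Int.toNat_natCast, String.toList_ofList]
  rw [show j + l.length - j = l.length by omega, List.drop_append, List.take_append]
  rw [show j - l.length = 0 by omega, List.drop_zero]
  have h2 : (l.drop j).length = l.length - j := by simp
  rw [List.take_of_length_le (by omega), h2]
  rw [show l.length - (l.length - j) = j by omega]
  exact (List.rotate_eq_drop_append_take (le_of_lt hj)).symm

-- Python's min(nonempty list) as a foldl of pvMin2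
lemma pvMinD_cons (h : String) (t : List String) (d : String) :
    PySem.List.minD (h :: t) (fun x => x) d = t.foldl pvMin2 h := by
  unfold pvMin2 PySem.List.minD PySem.List.min?
  simp only [List.foldl_cons]
  induction t generalizing h with
  | nil => rfl
  | cons h2 t2 ih =>
    simp only [List.foldl_cons]
    by_cases hlt : h2 < h
    · rw [if_pos hlt, if_pos hlt]; exact ih h2
    · rw [if_neg hlt, if_neg hlt]; exact ih h

-- the two candidate lists give the same minimum: A sees rotations 1..n (rotation n = rotation 0),
-- B sees rotations 0..n-1; the duplicate copy of rotation 0 is absorbed by the running min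
lemma pvMinAgree (l : List Char) (hx : l ≠ []) :
    (pvCands l.length l).foldl pvMin2 (String.ofList l)
      = PySem.List.minD ((List.range l.length).map (fun j => String.ofList (l.rotate j))) (fun x => x)
          (String.ofList l) := by
  obtain ⟨m, hm⟩ : ∃ m, l.length = m + 1 := by
    cases hl : l.length with
    | zero => exact absurd (List.length_eq_zero_iff.mp hl) hx
    | succ m => exact ⟨m, rfl⟩
  rw [hm]
  have hR : (List.range (m + 1)).map (fun j => String.ofList (l.rotate j))
      = String.ofList l :: pvCands m l := by
    rw [List.range_succ_eq_map]
    simp [pvCands, Function.comp]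
  have hL : pvCands (m + 1) l = pvCands m l ++ [String.ofList l] := by
    unfold pvCands
    rw [List.range_succ, List.map_append]
    simp [← hm, List.rotate_length]
  rw [hR, hL, pvMinD_cons, List.foldl_append]
  simp only [List.foldl_cons, List.foldl_nil]
  have hle : (pvCands m l).foldl pvMin2 (String.ofList l) ≤ String.ofList l :=
    foldl_pvMin2_le _ _
  unfold pvMin2
  split_ifs with h
  · exact absurd h (not_lt.mpr hle)
  · rfl

-- ===== VERDICT (by name: the statement is the Claim_ definition above) =====
theorem orderlyQueue_spec : Claim_equal_orderlyQueue := by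
  intro s k _
  show orderlyQueue s k = orderlyQueue_alt s k
  unfold orderlyQueue orderlyQueue_alt
  by_cases hk : k = 1
  · simp only [if_pos hk]
    obtain ⟨l, rfl⟩ : ∃ l : List Char, s = String.ofList l := ⟨s.toList, by simp⟩
    cases l with
    | nil => rfl
    | cons c cs =>
      have hx : (c :: cs) ≠ [] := by simp
      have hlen : PySem.Str.len (String.ofList (c :: cs)) = (((c :: cs).length : Nat) : Int) := by
        simp [PySem.Str.len]
      rw [hlen]
      rw [pvALoop _ _ _ hx]
      rw [PySem.List.length_pyRange_one, show (((((c :: cs).length : Nat) : Int)) - 0).toNat = (c :: cs).length by omega]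
      have hmap : (PySem.List.pyRange 0 (((c :: cs).length : Nat) : Int) 1).map
            (fun i => PySem.Str.slice (String.ofList ((c :: cs) ++ (c :: cs))) (some i)
              (some (i + (((c :: cs).length : Nat) : Int))))
          = (List.range (c :: cs).length).map (fun j => String.ofList ((c :: cs).rotate j)) := by
        rw [PySem.List.pyRange_one]
        rw [show ((((c :: cs).length : Nat) : Int) - 0).toNat = (c :: cs).length by omega]
        rw [List.map_map]
        apply List.map_congr_left
        intro j hj
        simp only [Function.comp_apply, zero_add]
        exact pvSliceRot (c :: cs) j (List.mem_range.mp hj)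
      simp only [String.toList_ofList]
      rw [hmap]
      exact pvMinAgree (c :: cs) hx
  · simp only [if_neg hk]
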